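-- pv_equiv track=rewrite | github.com/GPCRmd/GPCRmd | modules/covid19/views.py | detect_consecutive_res_segments
-- ===== SOURCE A (Python) =====
-- def detect_consecutive_res_segments(posli):
--     seg_li=[]
--     seg_from=posli[0]
--     seg_to=posli[0]
--     pre_pos=posli[0]
--     for pos in posli:
--         if pos >pre_pos+1:
--             seg_li.append([seg_from,pre_pos])
--             seg_from=pos
--         pre_pos=pos
--     seg_li.append([seg_from,pre_pos])
--     return seg_li
-- ===== SOURCE B (Python) =====
-- def detect_consecutive_res_segments(posli):
--     n = len(posli)
--     breaks = [i for i in range(1, n) if posli[i] > posli[i - 1] + 1]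
--     starts = [0] + breaks
--     ends = breaks + [n]
--     return [[posli[s], posli[e - 1]] for s, e in zip(starts, ends)]
-- ===== Notes on version B (the rewrite author's own statement) =====
-- stated objective: alternative
-- what changed: B replaces A's single stateful scan (carrying seg_from/pre_pos and appending segments on the fly) by a two-phase decomposition: first compute the list of break indices where an element exceeds its predecessor plus one, then emit the segments by pairing each start boundary with the following end boundary via zip.
import Mathlib
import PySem

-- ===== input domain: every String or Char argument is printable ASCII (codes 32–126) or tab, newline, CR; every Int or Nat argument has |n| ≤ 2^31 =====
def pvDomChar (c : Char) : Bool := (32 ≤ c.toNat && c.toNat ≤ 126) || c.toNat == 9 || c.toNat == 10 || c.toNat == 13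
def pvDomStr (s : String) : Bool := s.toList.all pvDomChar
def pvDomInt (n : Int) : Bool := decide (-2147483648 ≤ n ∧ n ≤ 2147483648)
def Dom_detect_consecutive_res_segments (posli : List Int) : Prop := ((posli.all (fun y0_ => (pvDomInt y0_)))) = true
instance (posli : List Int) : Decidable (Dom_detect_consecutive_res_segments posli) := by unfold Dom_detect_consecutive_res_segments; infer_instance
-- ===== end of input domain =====

-- B replaces A's single stateful scan (seg_from/pre_pos accumulator) by a two-phase
-- decomposition: first collect the break indices, then emit one segment per boundary pair
-- (objective: alternative, same cost).

-- ===== PORT A =====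
def detect_consecutive_res_segments (posli : List Int) : List (List Int) :=
  let seg_from := PySem.List.pyGetD posli 0 0
  let seg_to := PySem.List.pyGetD posli 0 0
  let pre_pos := PySem.List.pyGetD posli 0 0
  let st := posli.foldl
    (fun (s : List (List Int) × Int × Int × Int) pos =>
      if pos > s.2.2.2 + 1 then (s.1 ++ [[s.2.1, s.2.2.2]], pos, s.2.2.1, pos)
      else (s.1, s.2.1, s.2.2.1, pos))
    ([], seg_from, seg_to, pre_pos)
  st.1 ++ [[st.2.1, st.2.2.2]]

-- ===== PORT B =====
def detect_consecutive_res_segments_alt (posli : List Int) : List (List Int) :=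
  let n : Int := posli.length
  let breaks := (PySem.List.pyRange 1 n 1).filter
    (fun i => PySem.List.pyGetD posli i 0 > PySem.List.pyGetD posli (i - 1) 0 + 1)
  let starts := 0 :: breaks
  let ends := breaks ++ [n]
  (starts.zip ends).map
    (fun se => [PySem.List.pyGetD posli se.1 0, PySem.List.pyGetD posli (se.2 - 1) 0])

-- ===== PRECONDITION & SPEC =====
-- Pre_ excludes only the empty list, on which the Python A raises IndexError when it
-- subscripts the first element (B raises there too, in its final comprehension).
def Pre_detect_consecutive_res_segments (posli : List Int) : Prop := posli ≠ []
instance (posli : List Int) : Decidable (Pre_detect_consecutive_res_segments posli) := by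
  unfold Pre_detect_consecutive_res_segments; infer_instance

def pvWitness_detect_consecutive_res_segments : List Int := [1, 2, 5, 6, 9]

def Spec_detect_consecutive_res_segments (posli : List Int) (out : List (List Int)) : Prop :=
  out = detect_consecutive_res_segments_alt posli
instance (posli : List Int) (out : List (List Int)) :
    Decidable (Spec_detect_consecutive_res_segments posli out) := by
  unfold Spec_detect_consecutive_res_segments; infer_instance

-- ===== CLAIM (what is proved, stated in full; the proofs are below) =====
def Claim_equal_detect_consecutive_res_segments : Prop :=
  ∀ (posli : List Int), Dom_detect_consecutive_res_segments posli →
    Pre_detect_consecutive_res_segments posli →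
    Spec_detect_consecutive_res_segments posli (detect_consecutive_res_segments posli)

-- ===== LEMMAS AND PROOFS =====

-- Reference segmentation: pvGo start prev rest closes the open segment [start, …] at each
-- gap and opens a new one; pvEnd/pvTail are its head-end and tail, used to swap the start
-- of the first segment.
def pvGo (start prev : Int) : List Int → List (List Int)
  | [] => [[start, prev]]
  | p :: rest => if p > prev + 1 then [start, prev] :: pvGo p p rest else pvGo start p rest

-- A's loop body (the tuple state is (seg_li, seg_from, seg_to, pre_pos))
def pvStep (s : List (List Int) × Int × Int × Int) (pos : Int) : List (List Int) × Int × Int × Int :=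
  if pos > s.2.2.2 + 1 then (s.1 ++ [[s.2.1, s.2.2.2]], pos, s.2.2.1, pos)
  else (s.1, s.2.1, s.2.2.1, pos)

lemma pvA_fold (rest : List Int) : ∀ (acc : List (List Int)) (f t pre : Int),
    (rest.foldl pvStep (acc, f, t, pre)).1 ++
      [[(rest.foldl pvStep (acc, f, t, pre)).2.1, (rest.foldl pvStep (acc, f, t, pre)).2.2.2]]
      = acc ++ pvGo f pre rest := by
  induction rest with
  | nil => intro acc f t pre; simp [pvGo]
  | cons p r ih =>
    intro acc f t pre
    simp only [List.foldl_cons, pvGo, pvStep]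
    split_ifs with h
    · simpa using ih (acc ++ [[f, pre]]) p t p
    · exact ih acc f t p

lemma pvA_eq (p0 : Int) (rest : List Int) :
    detect_consecutive_res_segments (p0 :: rest) = pvGo p0 p0 rest := by
  have h0 : PySem.List.pyGetD (p0 :: rest) 0 0 = p0 := PySem.List.pyGetD_zero_cons p0 rest 0
  show ((p0 :: rest).foldl pvStep ([], _, _, _)).1 ++ _ = _
  simp only [h0, List.foldl_cons, pvStep]
  rw [if_neg (by omega : ¬ (p0 > p0 + 1))]
  exact pvA_fold rest [] p0 p0 p0

lemma pvGetD_cons_succ (x : Int) (xs : List Int) (i : Int) (hi : 0 ≤ i) :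
    PySem.List.pyGetD (x :: xs) (i + 1) 0 = PySem.List.pyGetD xs i 0 := by
  obtain ⟨m, rfl⟩ := Int.eq_ofNat_of_zero_le hi
  have h : (m : Int) + 1 = ((m + 1 : Nat) : Int) := by push_cast; ring
  rw [h, PySem.List.pyGetD_natCast, PySem.List.pyGetD_natCast]
  rfl

lemma pvRange_shift (a b : Int) :
    PySem.List.pyRange (a + 1) (b + 1) 1 = (PySem.List.pyRange a b 1).map (· + 1) := by
  rw [PySem.List.pyRange_one, PySem.List.pyRange_one, List.map_map]
  have h : b + 1 - (a + 1) = b - a := by ring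
  rw [h]
  apply List.map_congr_left
  intro k _
  simp; ring

def pvBreaks (posli : List Int) : List Int :=
  (PySem.List.pyRange 1 (posli.length : Int) 1).filter
    (fun i => PySem.List.pyGetD posli i 0 > PySem.List.pyGetD posli (i - 1) 0 + 1)

lemma pvBreaks_cons (p0 p : Int) (r : List Int) :
    pvBreaks (p0 :: p :: r) =
      (if p > p0 + 1 then [1] else []) ++ (pvBreaks (p :: r)).map (· + 1) := by
  have hrange : PySem.List.pyRange 1 ((p0 :: p :: r).length : Int) 1 =
      1 :: (PySem.List.pyRange 1 ((p :: r).length : Int) 1).map (· + 1) := by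
    have hlen : ((p0 :: p :: r).length : Int) = ((p :: r).length : Int) + 1 := by
      simp
    rw [hlen, PySem.List.pyRange_one_cons (by simp)]
    exact congrArg _ (pvRange_shift 1 _)
  unfold pvBreaks
  rw [hrange, List.filter_cons, List.filter_map]
  have hfil : List.filter
        ((fun i => decide (PySem.List.pyGetD (p0 :: p :: r) i 0 > PySem.List.pyGetD (p0 :: p :: r) (i - 1) 0 + 1)) ∘ (· + 1))
        (PySem.List.pyRange 1 ((p :: r).length : Int) 1)
      = List.filter (fun i => decide (PySem.List.pyGetD (p :: r) i 0 > PySem.List.pyGetD (p :: r) (i - 1) 0 + 1))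
        (PySem.List.pyRange 1 ((p :: r).length : Int) 1) := by
    apply List.filter_congr
    intro i hi
    have h1i : 1 ≤ i := ((PySem.List.mem_pyRange_one).1 hi).1
    have e1 : PySem.List.pyGetD (p0 :: p :: r) (i + 1) 0 = PySem.List.pyGetD (p :: r) i 0 :=
      pvGetD_cons_succ p0 (p :: r) i (by omega)
    have e2 : PySem.List.pyGetD (p0 :: p :: r) (i + 1 - 1) 0 = PySem.List.pyGetD (p :: r) (i - 1) 0 := by
      rw [show i + 1 - 1 = (i - 1) + 1 by ring, pvGetD_cons_succ p0 (p :: r) (i - 1) (by omega)]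
    simp only [Function.comp]
    rw [e1, e2]
  rw [hfil]
  have hc1 : PySem.List.pyGetD (p0 :: p :: r) 1 0 = p := by
    rw [show (1 : Int) = (0 : Int) + 1 from by ring, pvGetD_cons_succ p0 (p :: r) 0 le_rfl]
    exact PySem.List.pyGetD_zero_cons p r 0
  by_cases h : p > p0 + 1
  · rw [if_pos h, if_pos (by simp [hc1]; omega)]
    rfl
  · rw [if_neg h, if_neg (by simp [hc1]; omega)]
    rfl



def pvEnd (prev : Int) : List Int → Int
  | [] => prev
  | p :: rest => if p > prev + 1 then prev else pvEnd p rest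

def pvTail (prev : Int) : List Int → List (List Int)
  | [] => []
  | p :: rest => if p > prev + 1 then pvGo p p rest else pvTail p rest

lemma pvGo_shape (l : List Int) : ∀ start prev,
    pvGo start prev l = [start, pvEnd prev l] :: pvTail prev l := by
  induction l with
  | nil => intro s pr; rfl
  | cons q r ih =>
    intro s pr
    simp only [pvGo, pvEnd, pvTail]
    split_ifs with h
    · rfl
    · exact ih s q

def pvSeg (posli : List Int) (se : Int × Int) : List Int :=
  [PySem.List.pyGetD posli se.1 0, PySem.List.pyGetD posli (se.2 - 1) 0]

lemma pvAlt_unfold (posli : List Int) :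
    detect_consecutive_res_segments_alt posli =
      ((0 :: pvBreaks posli).zip (pvBreaks posli ++ [(posli.length : Int)])).map
        (pvSeg posli) := rfl

lemma pvBreaks_ge_one (posli : List Int) {i : Int} (h : i ∈ pvBreaks posli) : 1 ≤ i :=
  ((PySem.List.mem_pyRange_one).1 (List.mem_of_mem_filter h)).1

lemma pvShiftZip (x : Int) (xs : List Int) (u v : List Int)
    (hu : ∀ s ∈ u, 0 ≤ s) (hv : ∀ e ∈ v, 1 ≤ e) :
    ((u.map (· + 1)).zip (v.map (· + 1))).map (pvSeg (x :: xs)) = (u.zip v).map (pvSeg xs) := by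
  rw [List.zip_map, List.map_map]
  apply List.map_congr_left
  intro se hse
  obtain ⟨hs, he⟩ := List.of_mem_zip hse
  have hs0 : 0 ≤ se.1 := hu _ hs
  have he1 : 1 ≤ se.2 := hv _ he
  simp only [Function.comp, Prod.map, pvSeg]
  rw [pvGetD_cons_succ x xs se.1 hs0]
  rw [show se.2 + 1 - 1 = (se.2 - 1) + 1 from by ring,
    pvGetD_cons_succ x xs (se.2 - 1) (by omega)]

lemma pvAlt_eq (xs : List Int) : ∀ p0 : Int,
    detect_consecutive_res_segments_alt (p0 :: xs) = pvGo p0 p0 xs := by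
  induction xs with
  | nil =>
    intro p0
    rw [pvAlt_unfold]
    have hb : pvBreaks [p0] = [] := by
      unfold pvBreaks
      rw [show (([p0].length : Int)) = (1 : Int) from by simp,
        PySem.List.pyRange_one_eq_nil le_rfl, List.filter_nil]
    simp [hb, pvSeg, pvGo, PySem.List.pyGetD_zero_cons]
  | cons p r ih =>
    intro p0
    rw [pvAlt_unfold, pvBreaks_cons]
    have hm1 : (1 : Int) ≤ ((p :: r).length : Int) := by simp
    have hu : ∀ s ∈ 0 :: pvBreaks (p :: r), 0 ≤ s := by
      intro s hs
      rcases List.mem_cons.1 hs with rfl | hs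
      · exact le_rfl
      · exact le_trans (by omega) (pvBreaks_ge_one _ hs)
    have hv : ∀ e ∈ pvBreaks (p :: r) ++ [((p :: r).length : Int)], 1 ≤ e := by
      intro e he
      rcases List.mem_append.1 he with he | he
      · exact pvBreaks_ge_one _ he
      · simp at he; omega
    have hS : (((0 :: pvBreaks (p :: r)).map (· + 1)).zip
          ((pvBreaks (p :: r) ++ [((p :: r).length : Int)]).map (· + 1))).map (pvSeg (p0 :: p :: r))
        = pvGo p p r := by
      rw [pvShiftZip p0 (p :: r) _ _ hu hv, ← pvAlt_unfold]
      exact ih p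
    have hmap1 : (0 :: pvBreaks (p :: r)).map (· + 1)
        = 1 :: (pvBreaks (p :: r)).map (· + 1) := by simp
    have hmap2 : (pvBreaks (p :: r) ++ [((p :: r).length : Int)]).map (· + 1)
        = (pvBreaks (p :: r)).map (· + 1) ++ [((p :: r).length : Int) + 1] := by simp
    have hlen : ((p0 :: p :: r).length : Int) = ((p :: r).length : Int) + 1 := by simp
    have hget0 : PySem.List.pyGetD (p0 :: p :: r) 0 0 = p0 := PySem.List.pyGetD_zero_cons _ _ _
    by_cases h : p > p0 + 1
    · rw [if_pos h]
      -- breaks = 1 :: L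
      rw [hmap1, hmap2] at hS
      simp only [List.cons_append, List.nil_append, hlen]
      rw [List.zip_cons_cons, List.map_cons, hS]
      have : pvSeg (p0 :: p :: r) (0, 1) = [p0, p0] := by
        simp [pvSeg, hget0]
      rw [this, pvGo]
      rw [if_pos h]
    · rw [if_neg h]
      -- breaks = L; compare head with the shifted zip via hS
      obtain ⟨hd, tl, hht⟩ : ∃ hd tl,
          (pvBreaks (p :: r) ++ [((p :: r).length : Int)]).map (· + 1) = hd :: tl := by
        cases hL : (pvBreaks (p :: r)).map (· + 1) with
        | nil =>
          exact ⟨((p :: r).length : Int) + 1, [], by rw [hmap2, hL]; rfl⟩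
        | cons a as =>
          exact ⟨a, as ++ [((p :: r).length : Int) + 1], by rw [hmap2, hL]; rfl⟩
      rw [hmap1, hht] at hS
      simp only [List.zip_cons_cons, List.map_cons] at hS
      rw [pvGo_shape] at hS
      have hhead : pvSeg (p0 :: p :: r) (1, hd) = [p, pvEnd p r] := (List.cons.injEq _ _ _ _).mp hS |>.1
      have htl : List.map (pvSeg (p0 :: p :: r)) (((pvBreaks (p :: r)).map (· + 1)).zip tl) = pvTail p r :=
        ((List.cons.injEq _ _ _ _).mp hS).2
      have hht2 : (pvBreaks (p :: r)).map (· + 1) ++ [((p :: r).length : Int) + 1] = hd :: tl := by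
        rw [← hmap2, hht]
      simp only [List.nil_append, hlen]
      rw [hht2, List.zip_cons_cons, List.map_cons, htl]
      rw [pvGo, if_neg h, pvGo_shape]
      congr 1
      have hE : PySem.List.pyGetD (p0 :: p :: r) (hd - 1) 0 = pvEnd p r := by
        have := congrArg (fun l => l.getD 1 0) hhead
        simpa [pvSeg] using this
      simp [pvSeg, hget0, hE]

-- ===== VERDICT (by name: the statement is the Claim_ definition above) =====
theorem detect_consecutive_res_segments_spec : Claim_equal_detect_consecutive_res_segments := by
  intro posli _ hpre
  unfold Spec_detect_consecutive_res_segments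
  cases posli with
  | nil => exact absurd rfl hpre
  | cons p0 rest => exact (pvA_eq p0 rest).trans (pvAlt_eq rest p0).symm
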